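-- pv_equiv track=rewrite | github.com/becklin-haston/6502 | ArithmeticLogic.py | get_2c_bits
-- ===== SOURCE A (Python) =====
-- def add(first, second, bit_pattern=False):
--
--     if not bit_pattern:
--         first = first.bits
--         second = second.bits
--
--     START_INDEX = -1
--     STOP_INDEX = -9
--     LOOP_STEP = -1
--
--     new_bits = [0] * 8
--     carry = 0
--     for index in range(START_INDEX, STOP_INDEX, LOOP_STEP):
--
--         self_digit = first[index]
--         other_digit = second[index]
--
--         current_eval = carry + self_digit + other_digit
--         if current_eval == 0:
--             new_bits[index] = 0
--         elif current_eval == 1: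
--             if carry:
--                 carry = 0
--             new_bits[index] = 1
--         elif current_eval == 2:
--             new_bits[index] = 0
--             carry = 1
--         elif current_eval == 3:
--             new_bits[index] = 1
--
--     try:
--         new_bits[index - 1] = carry
--     except IndexError:
--         pass
--
--     int_bits = [int(digit) for digit in new_bits]
--     if bit_pattern:
--         return int_bits
--     else:
--         str_bits = [str(digit) if digit else "0" for digit in new_bits]
--         new_int = int("".join(str_bits), 2)
--         return new_int
--
-- def get_2c_bits(bit_pattern):
--     """
--     Returns the 2's complement of the bits.
--     """
--     ONE_AS_BIT_PATTERN = [0, 0, 0, 0, 0, 0, 0, 1]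
--
--     def invert_bits(bits):
--         new_bit_pattern = [0] * 8
--         for index, bit in enumerate(bits):
--             if bit == 0:
--                 new_bit_pattern[index] = 1
--             else:
--                 new_bit_pattern[index] = 0
--
--         return new_bit_pattern
--
--     inverted_bits = invert_bits(bit_pattern)
--     twos_comp_bit_pattern = add(inverted_bits, ONE_AS_BIT_PATTERN, bit_pattern=True)
--
--     return twos_comp_bit_pattern
-- ===== SOURCE B (Python) =====
-- def get_2c_bits(bit_pattern):
--     """
--     Returns the 2's complement of the bits.
--     """
--     bits = [0] * 8
--     for index, bit in enumerate(bit_pattern):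
--         bits[index] = 1 if bit == 0 else 0
--     # add one with an increment scan from the least-significant bit;
--     # the carry out of bit 0 is dropped (all-ones input wraps to all zeros)
--     for index in range(7, -1, -1):
--         if bits[index] == 0:
--             bits[index] = 1
--             break
--         bits[index] = 0
--     return bits
-- ===== Notes on version B (the rewrite author's own statement) =====
-- stated objective: simpler
-- what changed: Replaces the call to the general ripple-carry full-adder (add with ONE, with its 4-way case analysis and carry state) by a right-to-left increment scan that flips trailing ones to zero and sets the first zero bit to one.
import Mathlib
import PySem

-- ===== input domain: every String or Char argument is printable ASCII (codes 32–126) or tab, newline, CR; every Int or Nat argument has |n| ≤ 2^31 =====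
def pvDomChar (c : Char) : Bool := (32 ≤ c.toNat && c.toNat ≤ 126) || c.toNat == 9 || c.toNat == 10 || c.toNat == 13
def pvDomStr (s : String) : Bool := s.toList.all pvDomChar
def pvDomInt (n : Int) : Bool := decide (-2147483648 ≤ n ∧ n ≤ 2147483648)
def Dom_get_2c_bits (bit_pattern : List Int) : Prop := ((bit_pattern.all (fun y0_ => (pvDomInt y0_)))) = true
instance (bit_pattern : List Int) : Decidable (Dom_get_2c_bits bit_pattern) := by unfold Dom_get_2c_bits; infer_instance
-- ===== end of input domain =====

-- B replaces the ripple-carry full-adder call (add with ONE) by a right-to-left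
-- increment scan after the same invert step: simpler, no carry bookkeeping.

-- ===== PORT A =====
-- invert_bits: new_bit_pattern = [0]*8; for index, bit in enumerate(bits): set 1 if bit == 0 else 0
def pvInvertA (bits : List Int) : List Int :=
  (PySem.List.enumerate bits 0).foldl
    (fun acc p => if p.2 == 0 then acc.set p.1.toNat 1 else acc.set p.1.toNat 0)
    (List.replicate 8 0)

def pvONE : List Int := [0, 0, 0, 0, 0, 0, 0, 1]

-- one iteration of add()'s loop body; index runs over range(-1, -9, -1) and both
-- lists have length 8, so position index+8 is exactly Python's negative indexing here
def pvAddStep (first second : List Int) (st : List Int × Int) (index : Int) : List Int × Int :=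
  let new_bits := st.1
  let carry := st.2
  let self_digit := PySem.List.pyGetD first index 0
  let other_digit := PySem.List.pyGetD second index 0
  let current_eval := carry + self_digit + other_digit
  let pos : Nat := (index + 8).toNat
  if current_eval == 0 then (new_bits.set pos 0, carry)
  else if current_eval == 1 then (new_bits.set pos 1, 0)      -- 'if carry: carry = 0' leaves carry 0 either way
  else if current_eval == 2 then (new_bits.set pos 0, 1)
  else if current_eval == 3 then (new_bits.set pos 1, carry)
  else (new_bits, carry)

-- add(first, second, bit_pattern=True); the trailing 'new_bits[index - 1] = carry'
-- always hits index -9 (IndexError, caught and passed), and the int() map is identity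
def pvAdd (first second : List Int) : List Int :=
  ((PySem.List.pyRange (-1) (-9) (-1)).foldl (pvAddStep first second) (List.replicate 8 0, 0)).1

def get_2c_bits (bit_pattern : List Int) : List Int :=
  pvAdd (pvInvertA bit_pattern) pvONE

-- ===== PORT B =====
-- the increment scan: for index in range(7, -1, -1): if bits[index] == 0: set 1, break else set 0
def pvIncr (bits : List Int) : Nat → List Int
  | 0 => bits
  | n + 1 => if bits.getD n 0 == 0 then bits.set n 1 else pvIncr (bits.set n 0) n

def get_2c_bits_alt (bit_pattern : List Int) : List Int :=
  let bits := (PySem.List.enumerate bit_pattern 0).foldl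
    (fun acc p => acc.set p.1.toNat (if p.2 == 0 then 1 else 0))
    (List.replicate 8 0)
  pvIncr bits 8

-- ===== PRECONDITION & SPEC =====
-- Pre_ excludes bit patterns longer than 8, on which both Pythons raise IndexError
-- (assignment past the end of the 8-element work list)
def Pre_get_2c_bits (bit_pattern : List Int) : Prop := bit_pattern.length ≤ 8
instance (bit_pattern : List Int) : Decidable (Pre_get_2c_bits bit_pattern) := by unfold Pre_get_2c_bits; infer_instance
def pvWitness_get_2c_bits : List Int := [1, 0, 1]

def Spec_get_2c_bits (bit_pattern : List Int) (out : List Int) : Prop := out = get_2c_bits_alt bit_pattern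
instance (bit_pattern : List Int) (out : List Int) : Decidable (Spec_get_2c_bits bit_pattern out) := by unfold Spec_get_2c_bits; infer_instance

-- ===== CLAIM (what is proved, stated in full; the proofs are below) =====
def Claim_equal_get_2c_bits : Prop := ∀ (bit_pattern : List Int), Dom_get_2c_bits bit_pattern → Pre_get_2c_bits bit_pattern → Spec_get_2c_bits bit_pattern (get_2c_bits bit_pattern)

-- ===== LEMMAS AND PROOFS =====

-- the two invert folds use equal step functions
lemma invert_steps_eq :
    (fun (acc : List Int) (p : Int × Int) => if p.2 == 0 then acc.set p.1.toNat 1 else acc.set p.1.toNat 0)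
      = (fun (acc : List Int) (p : Int × Int) => acc.set p.1.toNat (if p.2 == 0 then 1 else 0)) := by
  funext acc p
  by_cases h : p.2 == 0 <;> simp [h]

-- the invert fold preserves length 8 and keeps every entry 0 or 1
lemma invert_fold_shape (ps : List (Int × Int)) (acc : List Int)
    (hlen : acc.length = 8) (hmem : ∀ x ∈ acc, x = 0 ∨ x = 1) :
    (ps.foldl (fun acc p => acc.set p.1.toNat (if p.2 == 0 then 1 else 0)) acc).length = 8 ∧
      ∀ x ∈ ps.foldl (fun acc p => acc.set p.1.toNat (if p.2 == 0 then 1 else 0)) acc, x = 0 ∨ x = 1 := by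
  induction ps generalizing acc with
  | nil => exact ⟨hlen, hmem⟩
  | cons p ps ih =>
      refine ih _ (by simp [hlen]) ?_
      intro x hx
      rcases List.mem_or_eq_of_mem_set hx with h | h
      · exact hmem x h
      · subst h; split <;> simp

-- the heart: on any length-8 0/1 list, the ripple-carry add of ONE equals the increment scan
lemma add_one_eq_incr (a b c d e f g h : Int)
    (ha : a = 0 ∨ a = 1) (hb : b = 0 ∨ b = 1) (hc : c = 0 ∨ c = 1) (hd : d = 0 ∨ d = 1)
    (he : e = 0 ∨ e = 1) (hf : f = 0 ∨ f = 1) (hg : g = 0 ∨ g = 1) (hh : h = 0 ∨ h = 1) :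
    pvAdd [a, b, c, d, e, f, g, h] pvONE = pvIncr [a, b, c, d, e, f, g, h] 8 := by
  rcases ha with rfl | rfl <;> rcases hb with rfl | rfl <;> rcases hc with rfl | rfl <;>
    rcases hd with rfl | rfl <;> rcases he with rfl | rfl <;> rcases hf with rfl | rfl <;>
    rcases hg with rfl | rfl <;> rcases hh with rfl | rfl <;> decide

-- bundle: any length-8 list of 0/1 entries
lemma add_one_eq_incr_list (l : List Int) (hlen : l.length = 8)
    (hmem : ∀ x ∈ l, x = 0 ∨ x = 1) : pvAdd l pvONE = pvIncr l 8 := by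
  rcases l with _ | ⟨a, _ | ⟨b, _ | ⟨c, _ | ⟨d, _ | ⟨e, _ | ⟨f, _ | ⟨g, _ | ⟨h, _ | ⟨i, t⟩⟩⟩⟩⟩⟩⟩⟩⟩ <;>
    simp only [List.length_cons, List.length_nil] at hlen <;> try omega
  exact add_one_eq_incr a b c d e f g h
    (hmem a (by simp)) (hmem b (by simp)) (hmem c (by simp)) (hmem d (by simp))
    (hmem e (by simp)) (hmem f (by simp)) (hmem g (by simp)) (hmem h (by simp))

-- ===== VERDICT (by name: the statement is the Claim_ definition above) =====
theorem get_2c_bits_spec : Claim_equal_get_2c_bits := by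
  intro bp _ _
  unfold Spec_get_2c_bits get_2c_bits get_2c_bits_alt pvInvertA
  rw [invert_steps_eq]
  obtain ⟨hlen, hmem⟩ := invert_fold_shape (PySem.List.enumerate bp 0) (List.replicate 8 0)
    (by simp) (by simp)
  exact add_one_eq_incr_list _ hlen hmem
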